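-- pv_equiv track=rewrite | github.com/TimaSv-Uk/cryptall_2 | task2/task2.py | reverse_find_neighbors_assignment5
-- ===== SOURCE A (Python) =====
-- def reverse_find_neighbors_assignment5(point, a, mod):
--     """
--     point = [y1, y2, y3, ...]
--     get X node from Y
--
--     # index 1: x1 = y1 - a
--     # even math index: x_i = y_i + y1 * x_{i-1}
--     # odd math index: x_i = y_i + x1 * y_{i-1}
--
--     """
--     point = point.copy()
--     neighbor_point = []
--
--     for i in range(len(point)):
--         if i == 0:
--             # x1 = y1 - a
--             x1 = (point[0] - a) % mod
--             neighbor_point.append(x1)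
--         elif i % 2 == 0:
--             # even math index x_i = y_i + y1 * x_{i-1}
--             x_i = (point[i] + (point[0] * neighbor_point[i - 1])) % mod
--             neighbor_point.append(x_i)
--         else:
--             # odd math index x_i = y_i + x1 * y_{i-1}
--             x_i = (point[i] + (neighbor_point[0] * point[i - 1])) % mod
--             neighbor_point.append(x_i)
--     return neighbor_point
-- ===== SOURCE B (Python) =====
-- def reverse_find_neighbors_assignment5(point, a, mod):
--     # Consume the tail two elements at a time (one odd-math-index element,
--     # then its even-index successor): no index arithmetic, no parity tests.
--     if not point:
--         return []
--     p0 = point[0]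
--     x1 = (p0 - a) % mod
--     out = [x1]
--     prev = p0
--     it = iter(point[1:])
--     for y_odd in it:
--         odd = (y_odd + x1 * prev) % mod
--         out.append(odd)
--         y_even = next(it, None)
--         if y_even is None:
--             break
--         out.append((y_even + p0 * odd) % mod)
--         prev = y_even
--     return out
-- ===== Notes on version B (the rewrite author's own statement) =====
-- stated objective: alternative
-- what changed: Replaces A's single indexed loop with its i==0 / i%2 three-way branch and reads back into the growing result list by a pairwise loop that consumes the tail two elements at a time (odd then even), keeping only the previous odd value and previous input element -- no index variable, no parity test, no lookup into the output list.
import Mathlib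
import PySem

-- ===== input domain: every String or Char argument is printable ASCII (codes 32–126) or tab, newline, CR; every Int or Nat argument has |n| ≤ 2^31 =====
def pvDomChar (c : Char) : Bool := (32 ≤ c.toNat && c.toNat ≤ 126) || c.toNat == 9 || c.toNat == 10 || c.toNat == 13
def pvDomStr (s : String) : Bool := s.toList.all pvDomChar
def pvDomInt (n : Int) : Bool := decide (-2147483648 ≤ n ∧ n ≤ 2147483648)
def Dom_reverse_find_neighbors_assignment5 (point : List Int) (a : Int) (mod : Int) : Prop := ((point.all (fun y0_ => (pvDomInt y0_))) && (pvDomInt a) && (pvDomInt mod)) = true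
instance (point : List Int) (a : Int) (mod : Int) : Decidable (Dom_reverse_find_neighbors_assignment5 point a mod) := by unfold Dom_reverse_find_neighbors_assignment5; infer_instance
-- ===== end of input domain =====

-- B consumes the tail two elements at a time (pairwise recursion, no index/parity
-- arithmetic); A and B agree whenever A returns (mod ≠ 0 or point empty).


-- ===== PORT A =====
-- Literal port of A: a fold over range(len(point)), appending one element per
-- index and reading neighbor_point[i-1] / neighbor_point[0] back from the accumulator.
def reverse_find_neighbors_assignment5 (point : List Int) (a : Int) (mod : Int) : List Int :=
  (PySem.List.pyRange 0 point.length 1).foldl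
    (fun np i =>
      if i = 0 then
        np ++ [PySem.Int.mod (PySem.List.pyGetD point 0 0 - a) mod]
      else if PySem.Int.mod i 2 = 0 then
        np ++ [PySem.Int.mod (PySem.List.pyGetD point i 0 +
                 PySem.List.pyGetD point 0 0 * PySem.List.pyGetD np (i - 1) 0) mod]
      else
        np ++ [PySem.Int.mod (PySem.List.pyGetD point i 0 +
                 PySem.List.pyGetD np 0 0 * PySem.List.pyGetD point (i - 1) 0) mod])
    []

-- ===== PORT B =====
-- Literal port of B's pairwise loop: consume the tail two elements at a time,
-- carrying only the previous input element; `[yodd]` is the next(it, None) = None break.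
def pvPairs (p0 x1 m prev : Int) : List Int → List Int
  | [] => []
  | [yodd] => [PySem.Int.mod (yodd + x1 * prev) m]
  | yodd :: yeven :: rest =>
      let o := PySem.Int.mod (yodd + x1 * prev) m
      o :: PySem.Int.mod (yeven + p0 * o) m :: pvPairs p0 x1 m yeven rest

def reverse_find_neighbors_assignment5_alt (point : List Int) (a : Int) (mod : Int) : List Int :=
  match point with
  | [] => []
  | p0 :: rest =>
    let x1 := PySem.Int.mod (p0 - a) mod
    x1 :: pvPairs p0 x1 mod p0 rest

-- ===== PRECONDITION & SPEC =====
-- Pre_ excludes only mod = 0 with a nonempty point, where Python A raises ZeroDivisionError.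
def Pre_reverse_find_neighbors_assignment5 (point : List Int) (a : Int) (mod : Int) : Prop :=
  point = [] ∨ mod ≠ 0
instance (point : List Int) (a : Int) (mod : Int) : Decidable (Pre_reverse_find_neighbors_assignment5 point a mod) := by unfold Pre_reverse_find_neighbors_assignment5; infer_instance

def pvWitness_reverse_find_neighbors_assignment5 : List Int × Int × Int := ([3, 4, 5, 6], 1, 7)

def Spec_reverse_find_neighbors_assignment5 (point : List Int) (a : Int) (mod : Int) (out : List Int) : Prop := out = reverse_find_neighbors_assignment5_alt point a mod
instance (point : List Int) (a : Int) (mod : Int) (out : List Int) : Decidable (Spec_reverse_find_neighbors_assignment5 point a mod out) := by unfold Spec_reverse_find_neighbors_assignment5; infer_instance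

-- ===== CLAIM (what is proved, stated in full; the proofs are below) =====
def Claim_equal_reverse_find_neighbors_assignment5 : Prop := ∀ (point : List Int) (a : Int) (mod : Int), Dom_reverse_find_neighbors_assignment5 point a mod → Pre_reverse_find_neighbors_assignment5 point a mod → Spec_reverse_find_neighbors_assignment5 point a mod (reverse_find_neighbors_assignment5 point a mod)

-- ===== LEMMAS AND PROOFS =====

-- Common characterisation: the value A places at index i.
def pvIdxVal (p0 : Int) (point : List Int) (a m : Int) (i : Int) : Int :=
  if i = 0 then PySem.Int.mod (p0 - a) m
  else if PySem.Int.mod i 2 ≠ 0 then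
    PySem.Int.mod (PySem.List.pyGetD point i 0 +
      PySem.Int.mod (p0 - a) m * PySem.List.pyGetD point (i - 1) 0) m
  else
    PySem.Int.mod (PySem.List.pyGetD point i 0 +
      p0 * PySem.Int.mod (PySem.List.pyGetD point (i - 1) 0 +
        PySem.Int.mod (p0 - a) m * PySem.List.pyGetD point (i - 1 - 1) 0) m) m

lemma pvFold_eq_map (p0 : Int) (rest : List Int) (a m : Int) (n : Nat) :
    ((PySem.List.pyRange 0 (n : Int) 1).foldl
      (fun np i =>
        if i = 0 then
          np ++ [PySem.Int.mod (PySem.List.pyGetD (p0 :: rest) 0 0 - a) m]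
        else if PySem.Int.mod i 2 = 0 then
          np ++ [PySem.Int.mod (PySem.List.pyGetD (p0 :: rest) i 0 +
                   PySem.List.pyGetD (p0 :: rest) 0 0 * PySem.List.pyGetD np (i - 1) 0) m]
        else
          np ++ [PySem.Int.mod (PySem.List.pyGetD (p0 :: rest) i 0 +
                   PySem.List.pyGetD np 0 0 * PySem.List.pyGetD (p0 :: rest) (i - 1) 0) m])
      [])
    = (PySem.List.pyRange 0 (n : Int) 1).map (pvIdxVal p0 (p0 :: rest) a m) := by
  induction n with
  | zero => simp [PySem.List.pyRange_one_eq_nil]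
  | succ k ih =>
    have hcast : ((k + 1 : Nat) : Int) = (k : Int) + 1 := by push_cast; ring
    rw [hcast, PySem.List.pyRange_one_succ_right (by positivity), List.foldl_append,
        List.map_append, ih]
    simp only [List.foldl_cons, List.foldl_nil, List.map_cons, List.map_nil]
    by_cases hk0 : (k : Int) = 0
    · have hk : k = 0 := by exact_mod_cast hk0
      subst hk
      simp [pvIdxVal, PySem.List.pyGetD_zero_cons]
    · have hkpos : 0 < (k : Int) := lt_of_le_of_ne (Int.natCast_nonneg k) (Ne.symm hk0)
      have hmem1 : PySem.List.pyGetD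
          ((PySem.List.pyRange 0 (k : Int) 1).map (pvIdxVal p0 (p0 :: rest) a m)) ((k : Int) - 1) 0
          = pvIdxVal p0 (p0 :: rest) a m ((k : Int) - 1) :=
        PySem.List.pyGetD_map_pyRange_of_nonneg _ _ _ _ (by omega) (by omega)
      by_cases hpar : PySem.Int.mod (k : Int) 2 = 0
      · have hdvd : (2 : Int) ∣ (k : Int) := (PySem.Int.mod_eq_zero_iff_dvd _ 2).mp hpar
        have hk1ne : ((k : Int) - 1) ≠ 0 := by omega
        have hk1odd : PySem.Int.mod ((k : Int) - 1) 2 ≠ 0 := by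
          rw [Ne, PySem.Int.mod_eq_zero_iff_dvd]
          omega
        rw [if_neg hk0, if_pos hpar, hmem1, PySem.List.pyGetD_zero_cons]
        simp only [pvIdxVal, if_neg hk0, if_neg hk1ne, if_pos hk1odd,
          if_neg (not_not_intro hpar)]
      · have hmem0 : PySem.List.pyGetD
            ((PySem.List.pyRange 0 (k : Int) 1).map (pvIdxVal p0 (p0 :: rest) a m)) 0 0
            = pvIdxVal p0 (p0 :: rest) a m 0 :=
          PySem.List.pyGetD_map_pyRange_of_nonneg _ _ _ _ le_rfl hkpos
        rw [if_neg hk0, if_neg hpar, hmem0]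
        simp only [pvIdxVal, if_true, if_neg hk0, if_pos hpar]

-- B's pairwise recursion produces exactly A's per-index values from any odd start index.
lemma pvPairs_eq_map (p0 : Int) (rest : List Int) (a m : Int)
    (l : List Int) (i : Nat) (hodd : i % 2 = 1) (hdrop : (p0 :: rest).drop i = l)
    (hle : i ≤ (p0 :: rest).length) :
    pvPairs p0 (PySem.Int.mod (p0 - a) m) m ((p0 :: rest).getD (i - 1) 0) l
      = (PySem.List.pyRange (i : Int) ((p0 :: rest).length : Int) 1).map
          (pvIdxVal p0 (p0 :: rest) a m) := by
  have hlen : (p0 :: rest).length = i + l.length := by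
    have h := congrArg List.length hdrop
    rw [List.length_drop] at h
    omega
  have hine : (i : Int) ≠ 0 := by omega
  have hioddZ : PySem.Int.mod (i : Int) 2 ≠ 0 := by
    rw [Ne, PySem.Int.mod_eq_zero_iff_dvd]; omega
  have hgetd : ∀ (k : Nat), (i : Int) - 1 + k = ((i - 1 + k : Nat) : Int) := by
    intro k; omega
  have hget : ∀ (k : Nat), k < l.length →
      PySem.List.pyGetD (p0 :: rest) ((i : Int) + k) 0 = l.getD k 0 := by
    intro k hk
    have h1 : ((i : Int) + k) = ((i + k : Nat) : Int) := by push_cast; ring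
    rw [h1, PySem.List.pyGetD_natCast]
    have : (p0 :: rest).getD (i + k) 0 = ((p0 :: rest).drop i).getD k 0 := by
      simp [List.getD, List.getElem?_drop]
    rw [this, hdrop]
  match l with
  | [] =>
    simp only [List.length_nil] at hlen
    rw [PySem.List.pyRange_one_eq_nil (by omega : ((p0 :: rest).length : Int) ≤ (i : Int))]
    simp [pvPairs]
  | [yodd] =>
    simp only [List.length_cons, List.length_nil] at hlen
    have hr : PySem.List.pyRange (i : Int) ((p0 :: rest).length : Int) 1
        = [(i : Int)] := by
      have h1 : ((p0 :: rest).length : Int) = (i : Int) + 1 := by simp only [List.length_cons]; omega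
      rw [h1, PySem.List.pyRange_one_singleton]
    rw [hr]
    have hy : PySem.List.pyGetD (p0 :: rest) (i : Int) 0 = yodd := by
      have := hget 0 (by simp)
      simpa using this
    have hprev : PySem.List.pyGetD (p0 :: rest) ((i : Int) - 1) 0
        = (p0 :: rest).getD (i - 1) 0 := by
      have h1 : ((i : Int) - 1) = ((i - 1 : Nat) : Int) := by omega
      rw [h1, PySem.List.pyGetD_natCast]
    simp only [pvPairs, List.map_cons, List.map_nil, pvIdxVal, if_neg hine,
      if_pos hioddZ, hy, hprev]
  | yodd :: yeven :: l' =>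
    simp only [List.length_cons] at hlen
    have hi1ne : ((i : Int) + 1) ≠ 0 := by omega
    have hi1even : ¬ PySem.Int.mod ((i : Int) + 1) 2 ≠ 0 := by
      rw [not_not, PySem.Int.mod_eq_zero_iff_dvd]; omega
    have hr : PySem.List.pyRange (i : Int) ((p0 :: rest).length : Int) 1
        = (i : Int) :: ((i : Int) + 1) ::
          PySem.List.pyRange ((i : Int) + 2) ((p0 :: rest).length : Int) 1 := by
      rw [PySem.List.pyRange_one_cons (by simp only [List.length_cons]; omega),
          PySem.List.pyRange_one_cons (by simp only [List.length_cons]; omega)]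
      ring_nf
    have hy : PySem.List.pyGetD (p0 :: rest) (i : Int) 0 = yodd := by
      have := hget 0 (by simp); simpa using this
    have hy1 : PySem.List.pyGetD (p0 :: rest) ((i : Int) + 1) 0 = yeven := by
      have := hget 1 (by simp); simpa using this
    have hprev : PySem.List.pyGetD (p0 :: rest) ((i : Int) - 1) 0
        = (p0 :: rest).getD (i - 1) 0 := by
      have h1 : ((i : Int) - 1) = ((i - 1 : Nat) : Int) := by omega
      rw [h1, PySem.List.pyGetD_natCast]
    have hdrop' : (p0 :: rest).drop (i + 2) = l' := by
      have : (p0 :: rest).drop (i + 2) = ((p0 :: rest).drop i).drop 2 := by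
        rw [List.drop_drop]
      rw [this, hdrop]; rfl
    have hgetd2 : (p0 :: rest).getD (i + 2 - 1) 0 = yeven := by
      have h1 : (p0 :: rest).getD (i + 1) 0 = ((p0 :: rest).drop i).getD 1 0 := by
        simp [List.getD, List.getElem?_drop]
      have h2 : i + 2 - 1 = i + 1 := by omega
      rw [h2, h1, hdrop]; rfl
    have hIH := pvPairs_eq_map p0 rest a m l' (i + 2) (by omega) hdrop' (by simp only [List.length_cons]; omega)
    rw [hgetd2] at hIH
    have hcast2 : ((i + 2 : Nat) : Int) = (i : Int) + 2 := by push_cast; ring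
    rw [hcast2] at hIH
    rw [hr]
    simp only [pvPairs, List.map_cons]
    rw [hIH]
    simp only [pvIdxVal, if_neg hine, if_pos hioddZ, if_neg hi1ne, if_neg hi1even,
      hy, hy1, hprev]
    have h11 : (i : Int) + 1 - 1 = (i : Int) := by ring
    rw [h11]
    simp [hy, hprev]
termination_by l.length
decreasing_by simp

-- ===== VERDICT (by name: the statement is the Claim_ definition above) =====
theorem reverse_find_neighbors_assignment5_spec : Claim_equal_reverse_find_neighbors_assignment5 := by
  intro point a m _ _
  unfold Spec_reverse_find_neighbors_assignment5
  cases point with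
  | nil => rfl
  | cons p0 rest =>
    unfold reverse_find_neighbors_assignment5 reverse_find_neighbors_assignment5_alt
    rw [pvFold_eq_map p0 rest a m (p0 :: rest).length]
    have hcons : PySem.List.pyRange 0 (((p0 :: rest).length : Nat) : Int) 1
        = 0 :: PySem.List.pyRange 1 (((p0 :: rest).length : Nat) : Int) 1 := by
      rw [PySem.List.pyRange_one_cons (by simp)]; norm_num
    rw [hcons]
    simp only [List.map_cons]
    have h0 : pvIdxVal p0 (p0 :: rest) a m 0 = PySem.Int.mod (p0 - a) m := by
      simp [pvIdxVal]
    have h1 := pvPairs_eq_map p0 rest a m rest 1 rfl rfl (by simp)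
    simp only [List.getD, Nat.cast_one] at h1
    rw [h0, ← h1]
    simp
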